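-- pv_equiv track=rewrite | github.com/pkoopongithub/ARS_ExplainableAI | ARSXAI9.py | _compress_sequences
-- ===== SOURCE A (Python) =====
-- def _compress_sequences(chains, sequence, new_nonterminal):
--     """Komprimiert Ketten durch Einführung eines Nonterminals"""
--     compressed = []
--     seq_tuple = tuple(sequence)
--     seq_len = len(sequence)
--
--     for chain in chains:
--         new_chain = []
--         i = 0
--         while i < len(chain):
--             if i <= len(chain) - seq_len and tuple(chain[i:i+seq_len]) == seq_tuple:
--                 new_chain.append(new_nonterminal)
--                 i += seq_len
--             else:
--                 new_chain.append(chain[i])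
--                 i += 1
--         compressed.append(new_chain)
--
--     return compressed
-- ===== SOURCE B (Python) =====
-- def _compress_sequences(chains, sequence, new_nonterminal):
--     """Three-phase rewrite: enumerate all occurrence starts, greedily select
--     non-overlapping ones, then rebuild each chain from copied segments."""
--     m = len(sequence)
--     seq = list(sequence)
--     result = []
--     for chain in chains:
--         if m == 0:
--             result.append(list(chain))
--             continue
--         occ = [i for i in range(len(chain) - m + 1) if list(chain[i:i+m]) == seq]
--         picked = []
--         free = 0
--         for i in occ:
--             if i >= free:
--                 picked.append(i)
--                 free = i + m
--         out = []
--         prev = 0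
--         for s in picked:
--             out.extend(chain[prev:s])
--             out.append(new_nonterminal)
--             prev = s + m
--         out.extend(chain[prev:])
--         result.append(out)
--     return result
-- ===== Notes on version B (the rewrite author's own statement) =====
-- stated objective: alternative
-- what changed: A's single interleaved scan-and-jump loop per chain is replaced by three separate phases: enumerate all occurrence start positions, greedily select the non-overlapping ones, then rebuild the chain from copied segments.
import Mathlib
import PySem

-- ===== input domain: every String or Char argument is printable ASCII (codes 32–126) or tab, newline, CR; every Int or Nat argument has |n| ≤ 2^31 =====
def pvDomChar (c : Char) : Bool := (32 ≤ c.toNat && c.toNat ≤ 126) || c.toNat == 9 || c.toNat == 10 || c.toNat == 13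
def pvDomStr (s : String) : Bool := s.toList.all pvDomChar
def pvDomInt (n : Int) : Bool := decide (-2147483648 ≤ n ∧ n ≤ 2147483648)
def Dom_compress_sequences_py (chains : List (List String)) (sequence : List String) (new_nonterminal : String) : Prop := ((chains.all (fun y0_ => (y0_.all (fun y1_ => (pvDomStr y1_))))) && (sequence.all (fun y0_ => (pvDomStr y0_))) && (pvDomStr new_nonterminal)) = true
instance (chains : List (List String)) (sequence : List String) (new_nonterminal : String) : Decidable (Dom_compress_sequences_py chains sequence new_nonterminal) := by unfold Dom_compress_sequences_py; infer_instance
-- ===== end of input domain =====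

-- B replaces A's interleaved scan-and-jump loop by three phases (enumerate occurrence
-- starts, greedily select non-overlapping ones, rebuild from segments); objective: alternative.


-- ===== PORT A =====
-- the while-loop of A: index i, list 'new_chain' accumulated in reverse (appends become cons);
-- fuel = chain.length bounds the iterations (each step has i < chain.length and, under
-- Pre_, i grows by at least 1, so the fuel is never exhausted on admitted inputs)
def pvALoop (chain seq : List String) (nt : String) : Nat → Nat → List String → List String
  | 0, _, acc => acc.reverse
  | fuel+1, i, acc =>
    if i < chain.length then
      -- i <= len(chain) - seq_len and tuple(chain[i:i+seq_len]) == seq_tuple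
      if (i : Int) ≤ (chain.length : Int) - (seq.length : Int) ∧
          PySem.List.slice chain (some (i : Int)) (some ((i : Int) + (seq.length : Int))) = seq then
        pvALoop chain seq nt fuel (i + seq.length) (nt :: acc)
      else
        -- chain[i]: i < len(chain), so the default is never used (exact)
        pvALoop chain seq nt fuel (i + 1) (PySem.List.pyGetD chain (i : Int) "" :: acc)
    else acc.reverse

def compress_sequences_py (chains : List (List String)) (sequence : List String) (new_nonterminal : String) : List (List String) :=
  chains.map (fun chain => pvALoop chain sequence new_nonterminal chain.length 0 [])

-- ===== PORT B =====
-- occ = [i for i in range(len(chain) - m + 1) if list(chain[i:i+m]) == seq]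
def pvOcc (chain seq : List String) : List Int :=
  (PySem.List.pyRange 0 ((chain.length : Int) - (seq.length : Int) + 1) 1).filter
    (fun i => PySem.List.slice chain (some i) (some (i + (seq.length : Int))) = seq)

-- the greedy selection loop: state (picked, free)
def pvPick (m : Int) (occ : List Int) : List Int :=
  (occ.foldl (fun (st : List Int × Int) i => if st.2 ≤ i then (st.1 ++ [i], i + m) else st)
    (([] : List Int), (0 : Int))).1

-- the rebuild loop: state (out, prev); then out.extend(chain[prev:])
def pvBuild (chain : List String) (m : Int) (nt : String) (picked : List Int) : List String :=
  let st := picked.foldl (fun (st : List String × Int) s =>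
      (st.1 ++ PySem.List.slice chain (some st.2) (some s) ++ [nt], s + m))
      (([] : List String), (0 : Int))
  st.1 ++ PySem.List.slice chain (some st.2) none

def compress_sequences_py_alt (chains : List (List String)) (sequence : List String) (new_nonterminal : String) : List (List String) :=
  chains.map (fun chain =>
    if sequence.length = 0 then chain
    else pvBuild chain (sequence.length : Int) new_nonterminal
           (pvPick (sequence.length : Int) (pvOcc chain sequence)))

-- ===== PRECONDITION & SPEC =====
-- Pre_ excludes exactly the inputs where A never returns: with an empty 'sequence' and some
-- non-empty chain, A's while-loop advances i by seq_len = 0 forever (it diverges); on every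
-- other input A returns normally.
def Pre_compress_sequences_py (chains : List (List String)) (sequence : List String) (new_nonterminal : String) : Prop :=
  sequence ≠ [] ∨ ∀ c ∈ chains, c = []
instance (chains : List (List String)) (sequence : List String) (new_nonterminal : String) : Decidable (Pre_compress_sequences_py chains sequence new_nonterminal) := by unfold Pre_compress_sequences_py; infer_instance

def pvWitness_compress_sequences_py : List (List String) × List String × String :=
  ([["a", "b", "a", "b", "c"]], ["a", "b"], "N")

def Spec_compress_sequences_py (chains : List (List String)) (sequence : List String) (new_nonterminal : String) (out : List (List String)) : Prop := out = compress_sequences_py_alt chains sequence new_nonterminal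
instance (chains : List (List String)) (sequence : List String) (new_nonterminal : String) (out : List (List String)) : Decidable (Spec_compress_sequences_py chains sequence new_nonterminal out) := by unfold Spec_compress_sequences_py; infer_instance

-- ===== CLAIM (what is proved, stated in full; the proofs are below) =====
def Claim_equal_compress_sequences_py : Prop := ∀ (chains : List (List String)) (sequence : List String) (new_nonterminal : String), Dom_compress_sequences_py chains sequence new_nonterminal → Pre_compress_sequences_py chains sequence new_nonterminal → Spec_compress_sequences_py chains sequence new_nonterminal (compress_sequences_py chains sequence new_nonterminal)

-- ===== LEMMAS AND PROOFS =====

-- proof-side reference function: the greedy rewrite, recursively on the chain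
def pvNaive (seq : List String) (nt : String) : List String → List String
  | [] => []
  | x :: r =>
    if seq ≠ [] ∧ ((x :: r).take seq.length = seq) then
      nt :: pvNaive seq nt ((x :: r).drop seq.length)
    else x :: pvNaive seq nt r
termination_by c => c.length
decreasing_by
  · simp only [List.length_drop, List.length_cons]
    rename_i h
    have : seq.length ≠ 0 := by have := List.length_pos_of_ne_nil h.1; omega
    omega
  · simp

-- Nat-indexed proof-side versions of B's three phases
def pvOccN (seq chain : List String) : List Nat :=
  (List.range (chain.length + 1 - seq.length)).filter (fun i => (chain.drop i).take seq.length = seq)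

def pvPickN (m : Nat) : List Nat → Nat → List Nat
  | [], _ => []
  | a :: l, f => if f ≤ a then a :: pvPickN m l (a + m) else pvPickN m l f

def pvBuildN (chain : List String) (m : Nat) (nt : String) : List Nat → Nat → List String
  | [], prev => chain.drop prev
  | s :: ps, prev => (chain.drop prev).take (s - prev) ++ nt :: pvBuildN chain m nt ps (s + m)

-- A's loop condition, restated as one take/drop equation
theorem pvCond_iff (chain seq : List String) (hm1 : 1 ≤ seq.length) (i : Nat) :
    ((i : Int) ≤ (chain.length : Int) - (seq.length : Int) ∧
      PySem.List.slice chain (some (i : Int)) (some ((i : Int) + (seq.length : Int))) = seq)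
      ↔ (chain.drop i).take seq.length = seq := by
  rw [PySem.List.slice_natCast_add]
  constructor
  · exact fun h => h.2
  · intro h
    refine ⟨?_, h⟩
    have hlen := congrArg List.length h
    simp only [List.length_take, List.length_drop] at hlen
    omega

theorem pvALoop_eq_naive (chain seq : List String) (nt : String) (hm : seq ≠ [])
    (fuel : Nat) : ∀ (i : Nat) (acc : List String), chain.length ≤ fuel + i →
    pvALoop chain seq nt fuel i acc = acc.reverse ++ pvNaive seq nt (chain.drop i) := by
  have hm1 : 1 ≤ seq.length := List.length_pos_of_ne_nil hm
  induction fuel with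
  | zero =>
    intro i acc hfuel
    rw [List.drop_eq_nil_of_le (show chain.length ≤ i by omega)]
    simp [pvALoop, pvNaive]
  | succ fuel ih =>
    intro i acc hfuel
    by_cases hi : i < chain.length
    · obtain ⟨x, r, hxr⟩ : ∃ x r, chain.drop i = x :: r := by
        cases h : chain.drop i with
        | nil =>
          exfalso
          have := congrArg List.length h
          simp at this; omega
        | cons x r => exact ⟨x, r, rfl⟩
      by_cases hc : (chain.drop i).take seq.length = seq
      · rw [show pvALoop chain seq nt (fuel+1) i acc
              = pvALoop chain seq nt fuel (i + seq.length) (nt :: acc) by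
            simp only [pvALoop]; rw [if_pos hi, if_pos ((pvCond_iff chain seq hm1 i).mpr hc)]]
        rw [ih (i + seq.length) (nt :: acc) (by omega), hxr]
        simp only [pvNaive]
        rw [if_pos ⟨hm, by rw [← hxr]; exact hc⟩]
        have hdd : chain.drop (i + seq.length) = (x :: r).drop seq.length := by
          rw [← hxr, List.drop_drop, Nat.add_comm]
        rw [hdd]
        simp [List.append_assoc]
      · rw [show pvALoop chain seq nt (fuel+1) i acc
              = pvALoop chain seq nt fuel (i + 1) (PySem.List.pyGetD chain (i : Int) "" :: acc) by
            simp only [pvALoop]; rw [if_pos hi, if_neg (fun h => hc ((pvCond_iff chain seq hm1 i).mp h))]]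
        rw [ih (i + 1) _ (by omega), hxr]
        simp only [pvNaive]
        rw [if_neg (by rw [← hxr]; exact fun h => hc h.2)]
        have hget : PySem.List.pyGetD chain (i : Int) "" = x := by
          rw [PySem.List.pyGetD_natCast]
          have h1 : chain.getD i "" = (chain.drop i).headD "" := by
            rw [List.getD_eq_getElem?_getD, ← List.head?_drop]
            cases h : chain.drop i <;> simp [List.headD]
          rw [h1, hxr]; rfl
        have hdt : chain.drop (i + 1) = r := by
          have h2 : (chain.drop i).drop 1 = r := by rw [hxr]; rfl
          rw [List.drop_drop] at h2
          exact h2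
        rw [hget, hdt]
        simp [List.append_assoc]
    · rw [List.drop_eq_nil_of_le (show chain.length ≤ i by omega)]
      simp only [pvALoop]
      rw [if_neg hi]
      simp [pvNaive]

-- ---- bridges from B's Int-valued loops to the Nat-indexed forms ----

theorem pvOcc_eq (chain seq : List String) :
    pvOcc chain seq = (pvOccN seq chain).map (Nat.cast : Nat → Int) := by
  unfold pvOcc pvOccN
  rw [PySem.List.pyRange_one]
  have hb : (((chain.length : Int) - (seq.length : Int) + 1) - 0).toNat
      = chain.length + 1 - seq.length := by omega
  rw [hb]
  simp only [zero_add]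
  rw [List.filter_map]
  refine congrArg (List.map (Nat.cast : Nat → Int)) ?_
  apply List.filter_congr
  intro i _
  simp [Function.comp, PySem.List.slice_natCast_add]

def pvPickI (m : Int) : List Int → Int → List Int
  | [], _ => []
  | a :: l, f => if f ≤ a then a :: pvPickI m l (a + m) else pvPickI m l f

theorem pvPick_foldl (m : Int) (l : List Int) : ∀ (acc : List Int) (f : Int),
    (l.foldl (fun (st : List Int × Int) i => if st.2 ≤ i then (st.1 ++ [i], i + m) else st) (acc, f)).1
      = acc ++ pvPickI m l f := by
  induction l with
  | nil => intro acc f; simp [pvPickI]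
  | cons a l ih =>
    intro acc f
    by_cases h : f ≤ a
    · simp only [List.foldl_cons, pvPickI]
      rw [if_pos h, if_pos h, ih]
      simp
    · simp only [List.foldl_cons, pvPickI]
      rw [if_neg h, if_neg h, ih]

theorem pvPickI_cast (m : Nat) (l : List Nat) : ∀ (f : Nat),
    pvPickI (m : Int) (l.map (Nat.cast : Nat → Int)) (f : Int)
      = (pvPickN m l f).map (Nat.cast : Nat → Int) := by
  induction l with
  | nil => intro f; simp [pvPickI, pvPickN]
  | cons a l ih =>
    intro f
    simp only [List.map_cons, pvPickI, pvPickN]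
    by_cases h : f ≤ a
    · rw [if_pos (by exact_mod_cast h), if_pos h]
      rw [show ((a : Int) + (m : Int)) = ((a + m : Nat) : Int) by push_cast; ring, ih]
      simp
    · rw [if_neg (by exact_mod_cast h), if_neg h, ih]

theorem pvBuild_loop (chain : List String) (m : Nat) (nt : String) :
    ∀ (ps : List Nat) (acc : List String) (prev : Nat),
    (let st := (ps.map (Nat.cast : Nat → Int)).foldl
        (fun (st : List String × Int) s =>
          (st.1 ++ PySem.List.slice chain (some st.2) (some s) ++ [nt], s + (m : Int)))
        (acc, (prev : Int))
     st.1 ++ PySem.List.slice chain (some st.2) none) = acc ++ pvBuildN chain m nt ps prev := by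
  intro ps
  induction ps with
  | nil => intro acc prev; simp [pvBuildN, PySem.List.slice_from_natCast]
  | cons s ps ih =>
    intro acc prev
    simp only [List.map_cons, List.foldl_cons, pvBuildN]
    rw [PySem.List.slice_natCast]
    rw [show ((s : Int) + (m : Int)) = ((s + m : Nat) : Int) by push_cast; ring]
    have h3 := ih (acc ++ ((chain.drop prev).take (s - prev) ++ [nt])) (s + m)
    simp only at h3 ⊢
    rw [← List.append_assoc] at h3
    rw [h3]
    simp [List.append_assoc]

-- ---- Nat-level structure lemmas ----

theorem pvOccN_nil (seq : List String) (hm : seq ≠ []) : pvOccN seq [] = [] := by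
  have : 1 ≤ seq.length := List.length_pos_of_ne_nil hm
  unfold pvOccN
  rw [show ([] : List String).length + 1 - seq.length = 0 by simp; omega]
  rfl

theorem pvOccN_cons (seq : List String) (hm : seq ≠ []) (x : String) (r : List String) :
    pvOccN seq (x :: r)
      = (if (x :: r).take seq.length = seq then [0] else [])
        ++ (pvOccN seq r).map (· + 1) := by
  have hm1 : 1 ≤ seq.length := List.length_pos_of_ne_nil hm
  by_cases hle : seq.length ≤ r.length + 1
  · unfold pvOccN
    rw [show (x :: r).length + 1 - seq.length = (r.length + 1 - seq.length) + 1 by simp; omega]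
    rw [List.range_succ_eq_map, List.filter_cons, List.filter_map]
    have hrest : List.filter ((fun i => decide (List.take seq.length (List.drop i (x :: r)) = seq)) ∘ Nat.succ)
          (List.range (r.length + 1 - seq.length))
        = List.filter (fun i => decide (List.take seq.length (List.drop i r) = seq))
          (List.range (r.length + 1 - seq.length)) := by
      apply List.filter_congr
      intro i _
      simp [Function.comp]
    rw [hrest]
    simp only [List.drop_zero]
    split_ifs <;> simp_all
  · have h1 : (x :: r).length + 1 - seq.length = 0 := by simp; omega
    have h2 : r.length + 1 - seq.length = 0 := by omega
    have hx : ¬ (x :: r).take seq.length = seq := by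
      intro h
      have := congrArg List.length h
      simp [List.length_take] at this
      omega
    unfold pvOccN
    rw [h1, h2]
    simp [hx]

-- occurrence positions at or beyond k are the positions of the k-dropped chain, shifted by k
theorem pvOccN_shift (seq : List String) (hm : seq ≠ []) :
    ∀ (k : Nat) (c : List String),
    (pvOccN seq c).filter (fun i => k ≤ i) = (pvOccN seq (c.drop k)).map (· + k) := by
  intro k
  induction k with
  | zero =>
    intro c
    simp
  | succ k ih =>
    intro c
    cases c with
    | nil => rw [pvOccN_nil seq hm]; simp [pvOccN_nil seq hm]
    | cons x r =>
      rw [pvOccN_cons seq hm x r, List.filter_append, List.filter_map]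
      have hhead : ((if (x :: r).take seq.length = seq then [0] else []) : List Nat).filter
          (fun i => decide (k + 1 ≤ i)) = [] := by
        split_ifs <;> simp
      rw [hhead]
      have hpred : (pvOccN seq r).filter ((fun i => decide (k + 1 ≤ i)) ∘ (· + 1))
          = (pvOccN seq r).filter (fun i => k ≤ i) := by
        apply List.filter_congr
        intro i _
        exact decide_eq_decide.mpr (by beta_reduce; omega)
      rw [hpred, ih r, List.map_map, List.drop_succ_cons]
      simp only [List.nil_append]
      rfl

theorem pvPickN_congr (m : Nat) : ∀ (l : List Nat) (f f' : Nat), f ≤ f' →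
    (∀ a ∈ l, f ≤ a → f' ≤ a) → pvPickN m l f = pvPickN m l f' := by
  intro l
  induction l with
  | nil => intros; rfl
  | cons a l ih =>
    intro f f' hff hall
    simp only [pvPickN]
    by_cases h' : f' ≤ a
    · rw [if_pos h', if_pos (le_trans hff h')]
    · have h : ¬ f ≤ a := fun h => h' (hall a (by simp) h)
      rw [if_neg h, if_neg h']
      exact ih f f' hff (fun b hb => hall b (by simp [hb]))

theorem pvPickN_filter (m : Nat) : ∀ (l : List Nat) (f k : Nat), k ≤ f →
    pvPickN m l f = pvPickN m (l.filter (fun a => k ≤ a)) f := by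
  intro l
  induction l with
  | nil => intros; rfl
  | cons a l ih =>
    intro f k hkf
    by_cases hka : k ≤ a
    · rw [List.filter_cons_of_pos (by simpa using hka)]
      simp only [pvPickN]
      by_cases hfa : f ≤ a
      · rw [if_pos hfa, if_pos hfa, ih (a + m) k (by omega)]
      · rw [if_neg hfa, if_neg hfa, ih f k hkf]
    · rw [List.filter_cons_of_neg (by simpa using hka)]
      simp only [pvPickN]
      rw [if_neg (by omega), ih f k hkf]

theorem pvPickN_shift (m : Nat) : ∀ (l : List Nat) (f k : Nat),
    pvPickN m (l.map (· + k)) (f + k) = (pvPickN m l f).map (· + k) := by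
  intro l
  induction l with
  | nil => intros; rfl
  | cons a l ih =>
    intro f k
    simp only [List.map_cons, pvPickN]
    by_cases h : f ≤ a
    · rw [if_pos (by omega), if_pos h, show a + k + m = a + m + k by omega, ih]
      simp
    · rw [if_neg (by omega), if_neg h, ih]

theorem pvBuildN_shift (c : List String) (m : Nat) (nt : String) :
    ∀ (ps : List Nat) (k f : Nat),
    pvBuildN c m nt (ps.map (· + k)) (f + k) = pvBuildN (c.drop k) m nt ps f := by
  intro ps
  induction ps with
  | nil => intro k f; simp [pvBuildN, List.drop_drop, Nat.add_comm]
  | cons s ps ih =>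
    intro k f
    simp only [List.map_cons, pvBuildN]
    rw [show s + k - (f + k) = s - f by omega,
        show s + k + m = (s + m) + k by omega, ih]
    congr 2
    rw [List.drop_drop]
    ring_nf

theorem pvBuildN_cons (x : String) (r : List String) (m : Nat) (nt : String) :
    ∀ (ps : List Nat),
    pvBuildN (x :: r) m nt (ps.map (· + 1)) 0 = x :: pvBuildN r m nt ps 0 := by
  intro ps
  cases ps with
  | nil => rfl
  | cons s ps =>
    simp only [List.map_cons, pvBuildN, List.drop_zero, Nat.sub_zero]
    rw [show s + 1 + m = (s + m) + 1 by omega, pvBuildN_shift (x :: r) m nt ps 1 (s + m)]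
    simp [List.take_succ_cons, List.drop_succ_cons]

theorem pvMain (seq : List String) (nt : String) (hm : seq ≠ []) :
    ∀ (n : Nat) (c : List String), c.length ≤ n →
    pvBuildN c seq.length nt (pvPickN seq.length (pvOccN seq c) 0) 0 = pvNaive seq nt c := by
  have hm1 : 1 ≤ seq.length := List.length_pos_of_ne_nil hm
  intro n
  induction n with
  | zero =>
    intro c hc
    cases c with
    | nil => rw [pvOccN_nil seq hm]; simp [pvPickN, pvBuildN, pvNaive]
    | cons x r => simp at hc
  | succ n ih =>
    intro c hc
    cases c with
    | nil => rw [pvOccN_nil seq hm]; simp [pvPickN, pvBuildN, pvNaive]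
    | cons x r =>
      rw [pvOccN_cons seq hm x r]
      by_cases hx : (x :: r).take seq.length = seq
      · rw [if_pos hx]
        simp only [List.cons_append, List.nil_append, pvPickN]
        rw [if_pos (le_refl 0), Nat.zero_add]
        have hchain : pvPickN seq.length ((pvOccN seq r).map (· + 1)) seq.length
            = (pvPickN seq.length (pvOccN seq ((x :: r).drop seq.length)) 0).map (· + seq.length) := by
          rw [pvPickN_filter seq.length _ seq.length seq.length (le_refl _)]
          have hfm : ((pvOccN seq r).map (· + 1)).filter (fun a => seq.length ≤ a)
              = ((pvOccN seq r).filter (fun i => seq.length - 1 ≤ i)).map (· + 1) := by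
            rw [List.filter_map]
            apply congrArg
            apply List.filter_congr
            intro i _
            exact decide_eq_decide.mpr (by beta_reduce; omega)
          rw [hfm, pvOccN_shift seq hm (seq.length - 1) r, List.map_map]
          have hdp : (x :: r).drop seq.length = r.drop (seq.length - 1) := by
            conv_lhs => rw [show seq.length = (seq.length - 1) + 1 by omega]
            rw [List.drop_succ_cons]
          rw [hdp]
          rw [show ((· + 1) ∘ (· + (seq.length - 1)) : Nat → Nat) = (· + seq.length) from
            funext fun i => by simp; omega]
          rw [← pvPickN_shift seq.length _ 0 seq.length, Nat.zero_add]
        rw [hchain]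
        simp only [pvBuildN, List.drop_zero, Nat.sub_zero, List.take_zero, List.nil_append]
        rw [show pvBuildN (x :: r) seq.length nt
              ((pvPickN seq.length (pvOccN seq ((x :: r).drop seq.length)) 0).map (· + seq.length))
              (0 + seq.length)
            = pvBuildN ((x :: r).drop seq.length) seq.length nt
              (pvPickN seq.length (pvOccN seq ((x :: r).drop seq.length)) 0) 0 from
          pvBuildN_shift (x :: r) seq.length nt _ seq.length 0]
        rw [ih ((x :: r).drop seq.length) (by simp [List.length_drop] at hc ⊢; omega)]
        conv_rhs => rw [pvNaive]
        rw [if_pos ⟨hm, hx⟩]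
      · rw [if_neg hx]
        simp only [List.nil_append]
        have hpk : pvPickN seq.length ((pvOccN seq r).map (· + 1)) 0
            = (pvPickN seq.length (pvOccN seq r) 0).map (· + 1) := by
          rw [pvPickN_congr seq.length _ 0 1 (by omega) ?hml]
          case hml =>
            intro a ha _
            obtain ⟨b, _, rfl⟩ := List.mem_map.mp ha
            omega
          rw [show (1 : Nat) = 0 + 1 by omega, pvPickN_shift seq.length _ 0 1]
        rw [hpk, pvBuildN_cons, ih r (by simp at hc; omega)]
        conv_rhs => rw [pvNaive]
        rw [if_neg (fun h => hx h.2)]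

theorem pvB_eq_naive (chain seq : List String) (nt : String) (hm : seq ≠ []) :
    pvBuild chain (seq.length : Int) nt (pvPick (seq.length : Int) (pvOcc chain seq)) =
      pvNaive seq nt chain := by
  rw [pvOcc_eq]
  have hpick : pvPick (seq.length : Int) ((pvOccN seq chain).map (Nat.cast : Nat → Int))
      = (pvPickN seq.length (pvOccN seq chain) 0).map (Nat.cast : Nat → Int) := by
    unfold pvPick
    rw [show ((0 : Int)) = ((0 : Nat) : Int) from rfl, pvPick_foldl, pvPickI_cast]
    simp
  rw [hpick]
  have hb := pvBuild_loop chain seq.length nt (pvPickN seq.length (pvOccN seq chain) 0) [] 0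
  have hb2 : pvBuild chain (seq.length : Int) nt
      ((pvPickN seq.length (pvOccN seq chain) 0).map (Nat.cast : Nat → Int))
      = [] ++ pvBuildN chain seq.length nt (pvPickN seq.length (pvOccN seq chain) 0) 0 := hb
  rw [hb2, List.nil_append, pvMain seq nt hm chain.length chain (le_refl _)]

-- ===== VERDICT (by name: the statement is the Claim_ definition above) =====
theorem compress_sequences_py_spec : Claim_equal_compress_sequences_py := by
  intro chains sequence nt _ hpre
  unfold Spec_compress_sequences_py compress_sequences_py compress_sequences_py_alt
  rcases hpre with hm | hempty
  · apply List.map_congr_left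
    intro chain _
    have h0 : ¬ sequence.length = 0 := by have := List.length_pos_of_ne_nil hm; omega
    rw [if_neg h0, pvB_eq_naive chain sequence nt hm,
        pvALoop_eq_naive chain sequence nt hm chain.length 0 [] (by omega)]
    simp
  · apply List.map_congr_left
    intro chain hc
    rw [hempty chain hc]
    by_cases h0 : sequence.length = 0
    · simp [h0, pvALoop]
    · have hocc : pvOcc [] sequence = [] := by
        unfold pvOcc
        rw [PySem.List.pyRange_one_eq_nil (by simp; omega)]
        rfl
      simp [h0, pvALoop, pvBuild, pvPick, hocc, PySem.List.slice]
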